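-- pv_equiv track=rewrite | github.com/LynxTWO/mix-marriage-offline | src/mmo/dsp/channel_layout.py | sanitize_ffmpeg_layout_token
-- ===== SOURCE A (Python) =====
-- def sanitize_ffmpeg_layout_token(normalized_layout: str) -> str:
--     """
--     Preserve existing token behavior from meters_truth:
--       - remove dots
--       - (side)->_side, (wide)->_wide
--     Add stable handling for other parenthetical modifiers by converting
--     '(' and ')' to underscores and collapsing repeats.
--     """
--     token = normalized_layout.replace(".", "")
--     token = token.replace("(side)", "_side").replace("(wide)", "_wide")
--     token = token.replace("(", "_").replace(")", "")
--     token = token.replace("-", "_")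
--     while "__" in token:
--         token = token.replace("__", "_")
--     return token.strip("_")
-- ===== SOURCE B (Python) =====
-- def sanitize_ffmpeg_layout_token(normalized_layout: str) -> str:
--     out = []
--     prev_us = False
--     for ch in normalized_layout:
--         if ch == "." or ch == ")":
--             continue
--         if ch == "(" or ch == "-":
--             ch = "_"
--         if ch == "_":
--             if not prev_us:
--                 out.append("_")
--                 prev_us = True
--         else:
--             out.append(ch)
--             prev_us = False
--     return "".join(out).strip("_")
-- ===== Notes on version B (the rewrite author's own statement) =====
-- stated objective: simpler
-- what changed: A's seven whole-string replace passes plus a while-loop that repeatedly collapses '__' are replaced by one left-to-right pass that skips '.'/')', maps '('/'-' to '_', and collapses runs of underscores on the fly via a last-was-underscore flag, followed by a single strip of '_'.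
import Mathlib
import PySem

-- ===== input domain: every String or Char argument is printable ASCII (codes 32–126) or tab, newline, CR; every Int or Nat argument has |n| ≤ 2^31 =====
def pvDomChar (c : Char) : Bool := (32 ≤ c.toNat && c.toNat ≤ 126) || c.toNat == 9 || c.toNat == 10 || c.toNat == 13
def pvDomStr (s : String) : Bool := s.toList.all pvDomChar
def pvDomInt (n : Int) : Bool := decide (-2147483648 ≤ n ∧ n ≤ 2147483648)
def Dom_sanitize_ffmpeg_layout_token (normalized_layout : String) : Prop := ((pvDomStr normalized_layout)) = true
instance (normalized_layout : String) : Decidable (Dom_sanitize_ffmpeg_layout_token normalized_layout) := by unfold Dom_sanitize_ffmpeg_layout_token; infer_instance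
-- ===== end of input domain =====

-- B rewrites A's seven whole-string replace passes (plus a fixpoint while-loop) as ONE
-- left-to-right pass with an accumulator and a last-was-underscore flag (objective: simpler).

-- ===== PORT A =====
-- helper for A's port: str.replace written without the accumulator, used to prove the
-- while-loop termination bound pvReplace_len_lt that the port cites in its decreasing_by
def pvRepG (old new : List Char) : List Char → List Char
  | [] => []
  | c :: t =>
    if old.isPrefixOf (c :: t) then new ++ pvRepG old new (List.drop (max old.length 1) (c :: t))
    else c :: pvRepG old new t
termination_by l => l.length
decreasing_by
  all_goals simp

theorem pvRepG_go (old new : List Char) (h : old ≠ []) :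
    ∀ fuel l acc, l.length ≤ fuel →
      PySem.Chars.replace.go old new fuel l acc = acc.reverse ++ pvRepG old new l := by
  intro fuel
  induction fuel with
  | zero =>
    intro l acc hl
    have hl0 : l = [] := List.eq_nil_of_length_eq_zero (Nat.le_zero.mp hl)
    subst hl0
    rw [PySem.Chars.replace.go.eq_def]
    simp [pvRepG]
  | succ n ih =>
    intro l acc hl
    have hop : 1 ≤ old.length := List.length_pos_iff.mpr h
    cases l with
    | nil =>
      rw [PySem.Chars.replace.go.eq_def]
      simp [pvRepG]
    | cons c t =>
      rw [PySem.Chars.replace.go.eq_def]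
      by_cases hp : old.isPrefixOf (c :: t) = true
      · simp only [hp, if_true]
        rw [ih (List.drop old.length (c :: t)) (new.reverse ++ acc)
            (by simp at hl ⊢; omega)]
        rw [pvRepG]
        simp [hp, Nat.max_eq_left hop, List.append_assoc]
      · simp only [hp, if_false, Bool.false_eq_true]
        rw [ih t (c :: acc) (by simp at hl ⊢; omega)]
        rw [pvRepG]
        simp [hp]

theorem pvReplace_eq_repG (s old new : List Char) (h : old ≠ []) :
    PySem.Chars.replace s old new = pvRepG old new s := by
  have hne : old.isEmpty ≠ true := by simp [h]
  unfold PySem.Chars.replace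
  rw [if_neg hne, pvRepG_go old new h s.length s [] (le_refl _)]
  simp

theorem pvRepG_len_le (l : List Char) :
    (pvRepG ['_', '_'] ['_'] l).length ≤ l.length := by
  fun_induction pvRepG
  · simp
  · rename_i c t hp ih
    simp at ih ⊢
    omega
  · rename_i c t hp ih
    simp
    omega

theorem pvRepG_len_lt (l : List Char) (h : ['_', '_'] <:+: l) :
    (pvRepG ['_', '_'] ['_'] l).length < l.length := by
  fun_induction pvRepG
  · simp at h
  · rename_i c t hp ih
    have hle := pvRepG_len_le (List.drop (max (['_', '_'] : List Char).length 1) (c :: t))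
    have hpre : (['_', '_'] : List Char) <+: c :: t := List.isPrefixOf_iff_prefix.mp hp
    have h2 : 2 ≤ (c :: t).length := hpre.length_le
    simp only [List.length_cons, List.length_append, List.length_drop, List.length_nil] at hle h2 ⊢
    omega
  · rename_i c t hp ih
    have hnp : ¬ ((['_', '_'] : List Char) <+: c :: t) := by
      intro hc
      exact hp (List.isPrefixOf_iff_prefix.mpr hc)
    have hin : (['_', '_'] : List Char) <:+: t := by
      rcases List.infix_cons_iff.mp h with h' | h'
      · exact absurd h' hnp
      · exact h'
    have := ih hin
    simp
    omega

-- termination bound for A's while loop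
theorem pvReplace_len_lt (t : String) (h : PySem.Str.isIn "__" t = true) :
    (PySem.Str.replace t "__" "_").toList.length < t.toList.length := by
  have h2 : ("__" : String).toList = ['_', '_'] := by decide
  have h1 : ("_" : String).toList = ['_'] := by decide
  rw [PySem.Str.toList_replace, h2, h1, pvReplace_eq_repG _ _ _ (by decide)]
  apply pvRepG_len_lt
  have := (PySem.Str.isIn_iff_infix "__" t).mp h
  rwa [h2] at this

-- `while "__" in token: token = token.replace("__", "_")`
def pvLoopA (token : String) : String :=
  if PySem.Str.isIn "__" token then pvLoopA (PySem.Str.replace token "__" "_") else token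
termination_by token.toList.length
decreasing_by exact pvReplace_len_lt _ (by assumption)

def sanitize_ffmpeg_layout_token (normalized_layout : String) : String :=
  let token := PySem.Str.replace normalized_layout "." ""
  let token := PySem.Str.replace (PySem.Str.replace token "(side)" "_side") "(wide)" "_wide"
  let token := PySem.Str.replace (PySem.Str.replace token "(" "_") ")" ""
  let token := PySem.Str.replace token "-" "_"
  let token := pvLoopA token
  PySem.Str.stripChars token "_"

-- ===== PORT B =====
-- one step of B's single pass: state = (emitted chars, last-emitted-was-underscore flag)
def pvStepB (st : List Char × Bool) (ch : Char) : List Char × Bool :=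
  if ch = '.' ∨ ch = ')' then st
  else
    let ch := if ch = '(' ∨ ch = '-' then '_' else ch
    if ch = '_' then (if st.2 then st else (st.1 ++ ['_'], true))
    else (st.1 ++ [ch], false)

def sanitize_ffmpeg_layout_token_alt (normalized_layout : String) : String :=
  let r := normalized_layout.toList.foldl pvStepB ([], false)
  PySem.Str.stripChars (String.ofList r.1) "_"

-- ===== PRECONDITION & SPEC =====
def Spec_sanitize_ffmpeg_layout_token (normalized_layout : String) (out : String) : Prop := out = sanitize_ffmpeg_layout_token_alt normalized_layout
instance (normalized_layout : String) (out : String) : Decidable (Spec_sanitize_ffmpeg_layout_token normalized_layout out) := by unfold Spec_sanitize_ffmpeg_layout_token; infer_instance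

-- ===== CLAIM (what is proved, stated in full; the proofs are below) =====
def Claim_equal_sanitize_ffmpeg_layout_token : Prop := ∀ (normalized_layout : String), Dom_sanitize_ffmpeg_layout_token normalized_layout → Spec_sanitize_ffmpeg_layout_token normalized_layout (sanitize_ffmpeg_layout_token normalized_layout)

-- ===== LEMMAS AND PROOFS =====

-- the per-character substitution that A's replace chain amounts to
def pvPhi (c : Char) : List Char :=
  if c = '.' ∨ c = ')' then [] else if c = '(' ∨ c = '-' ∨ c = '_' then ['_'] else [c]

-- the combined substitution of A's '(' / ')' / '-' replaces
def pvPsi (c : Char) : List Char :=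
  if c = ')' then [] else if c = '(' ∨ c = '-' then ['_'] else [c]

-- collapse runs of '_' (b = a '_' was just emitted)
def pvSq : Bool → List Char → List Char
  | _, [] => []
  | b, c :: t => if c = '_' then (if b then pvSq true t else '_' :: pvSq true t) else c :: pvSq false t

def pvFa (b : Bool) (u : List Char) : Bool := u.foldl (fun _ c => c = '_') b

theorem pvFa_append (b : Bool) (u v : List Char) : pvFa b (u ++ v) = pvFa (pvFa b u) v := by
  simp [pvFa, List.foldl_append]

theorem pvSq_append (u : List Char) : ∀ (b : Bool) (v : List Char),
    pvSq b (u ++ v) = pvSq b u ++ pvSq (pvFa b u) v := by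
  induction u with
  | nil => intro b v; simp [pvSq, pvFa]
  | cons c u ih =>
    intro b v
    by_cases hc : c = '_'
    · subst hc
      cases b <;> simp [pvSq, pvFa, ih]
    · simp [pvSq, pvFa, hc, ih]

theorem pvFoldB (l : List Char) : ∀ (acc : List Char) (b : Bool),
    l.foldl pvStepB (acc, b) = (acc ++ pvSq b (l.flatMap pvPhi), pvFa b (l.flatMap pvPhi)) := by
  induction l with
  | nil => intro acc b; simp [pvSq, pvFa]
  | cons c l ih =>
    intro acc b
    have hstep : pvStepB (acc, b) c = (acc ++ pvSq b (pvPhi c), pvFa b (pvPhi c)) := by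
      by_cases h1 : c = '.'
      · subst h1; simp [pvStepB, pvPhi, pvSq, pvFa]
      · by_cases h2 : c = ')'
        · subst h2; simp [pvStepB, pvPhi, pvSq, pvFa]
        · by_cases h3 : c = '('
          · subst h3; cases b <;> simp [pvStepB, pvPhi, pvSq, pvFa]
          · by_cases h4 : c = '-'
            · subst h4; cases b <;> simp [pvStepB, pvPhi, pvSq, pvFa]
            · by_cases h5 : c = '_'
              · subst h5; cases b <;> simp [pvStepB, pvPhi, pvSq, pvFa]
              · cases b <;> simp [pvStepB, pvPhi, pvSq, pvFa, h1, h2, h3, h4, h5]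
    rw [List.foldl_cons, hstep, ih, List.flatMap_cons]
    simp [pvSq_append, pvFa_append, List.append_assoc]

theorem pvRepG_single (o : Char) (new : List Char) (l : List Char) :
    pvRepG [o] new l = l.flatMap (fun c => if c = o then new else [c]) := by
  induction l with
  | nil => simp [pvRepG]
  | cons c t ih =>
    by_cases hc : c = o
    · subst hc
      simp [pvRepG, List.isPrefixOf, ih]
    · simp [pvRepG, List.isPrefixOf, hc, ih, Ne.symm hc]

theorem pvRepG_flatMap (old new : List Char) (φ : Char → List Char) (h : old ≠ [])
    (hφ : old.flatMap φ = new.flatMap φ) : ∀ (n : Nat) (l : List Char), l.length ≤ n →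
    (pvRepG old new l).flatMap φ = l.flatMap φ := by
  intro n
  induction n with
  | zero =>
    intro l hl
    have hl0 : l = [] := List.eq_nil_of_length_eq_zero (Nat.le_zero.mp hl)
    subst hl0
    simp [pvRepG]
  | succ n ih =>
    intro l hl
    cases l with
    | nil => simp [pvRepG]
    | cons c t =>
      have hop : 1 ≤ old.length := List.length_pos_iff.mpr h
      rw [pvRepG]
      by_cases hp : old.isPrefixOf (c :: t) = true
      · simp only [hp, if_true, Nat.max_eq_left hop]
        have hpre : old <+: c :: t := List.isPrefixOf_iff_prefix.mp hp
        have htake : List.take old.length (c :: t) = old := (List.prefix_iff_eq_take.mp hpre).symm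
        have hsplit : old ++ (c :: t).drop old.length = c :: t := by
          conv_rhs => rw [← List.take_append_drop old.length (c :: t)]
          rw [htake]
        have hdl : ((c :: t).drop old.length).length ≤ n := by
          simp only [List.length_drop, List.length_cons] at *
          omega
        rw [List.flatMap_append, ih _ hdl, ← hφ, ← List.flatMap_append, hsplit]
      · simp only [hp, if_false, Bool.false_eq_true]
        have ht : t.length ≤ n := by
          simp only [List.length_cons] at hl
          omega
        simp [ih t ht]

theorem pvSq_repG : ∀ (n : Nat) (l : List Char), l.length ≤ n → ∀ b,
    pvSq b (pvRepG ['_', '_'] ['_'] l) = pvSq b l := by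
  intro n
  induction n with
  | zero =>
    intro l hl b
    have hl0 : l = [] := List.eq_nil_of_length_eq_zero (Nat.le_zero.mp hl)
    subst hl0
    simp [pvRepG]
  | succ n ih =>
    intro l hl b
    cases l with
    | nil => simp [pvRepG]
    | cons c t =>
      by_cases hp : (['_', '_'] : List Char).isPrefixOf (c :: t) = true
      · cases t with
        | nil => simp [List.isPrefixOf] at hp
        | cons d t2 =>
          simp [List.isPrefixOf] at hp
          obtain ⟨hc, hd⟩ := hp
          subst hc; subst hd
          rw [pvRepG]
          simp only [if_pos (by simp [List.isPrefixOf] : (['_', '_'] : List Char).isPrefixOf ('_' :: '_' :: t2) = true)]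
          have ht2 : t2.length ≤ n := by simp at hl; omega
          cases b <;> simp [pvSq, ih t2 ht2]
      · rw [pvRepG]
        simp only [hp, if_false, Bool.false_eq_true]
        have ht : t.length ≤ n := by simp at hl; omega
        by_cases hc : c = '_'
        · subst hc; cases b <;> simp [pvSq, ih t ht]
        · cases b <;> simp [pvSq, hc, ih t ht]

theorem pvSq_fix : ∀ (l : List Char) (b : Bool), ¬ (['_', '_'] <:+: l) →
    (b = true → l.head? ≠ some '_') → pvSq b l = l := by
  intro l
  induction l with
  | nil => intro b _ _; simp [pvSq]
  | cons c t ih =>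
    intro b hinf hhead
    have h1 : ¬ (['_', '_'] : List Char) <:+: t := fun h => hinf (List.infix_cons_iff.mpr (Or.inr h))
    by_cases hc : c = '_'
    · subst hc
      have hb : b = false := by
        cases b
        · rfl
        · exact absurd rfl (hhead rfl)
      subst hb
      have h2 : t.head? ≠ some '_' := by
        intro he
        cases t with
        | nil => simp at he
        | cons d t2 =>
          simp at he
          subst he
          exact hinf (List.infix_cons_iff.mpr (Or.inl ⟨t2, rfl⟩))
      simp [pvSq, ih true h1 (fun _ => h2)]
    · simp [pvSq, hc, ih false h1 (by simp)]

theorem pvLoopA_eq (t : String) : pvLoopA t = String.ofList (pvSq false t.toList) := by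
  have H : ∀ (n : Nat) (t : String), t.toList.length ≤ n →
      pvLoopA t = String.ofList (pvSq false t.toList) := by
    intro n
    induction n with
    | zero =>
      intro t hl
      rw [pvLoopA]
      have hnil : t.toList = [] := List.eq_nil_of_length_eq_zero (Nat.le_zero.mp hl)
      have hin : PySem.Str.isIn "__" t ≠ true := by
        intro h
        have := pvReplace_len_lt t h
        omega
      rw [if_neg hin, pvSq_fix t.toList false (by simp [hnil]) (by simp)]
      exact String.ofList_toList.symm
    | succ n ih =>
      intro t hl
      rw [pvLoopA]
      by_cases hin : PySem.Str.isIn "__" t = true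
      · rw [if_pos hin]
        have hlt := pvReplace_len_lt t hin
        rw [ih _ (by omega)]
        have h2 : ("__" : String).toList = ['_', '_'] := by decide
        have h1 : ("_" : String).toList = ['_'] := by decide
        rw [PySem.Str.toList_replace, h2, h1, pvReplace_eq_repG _ _ _ (by decide),
          pvSq_repG t.toList.length t.toList (le_refl _) false]
      · rw [if_neg hin]
        have hni : ¬ (['_', '_'] <:+: t.toList) := by
          intro hi
          apply hin
          apply (PySem.Str.isIn_iff_infix "__" t).mpr
          have h2 : ("__" : String).toList = ['_', '_'] := by decide
          rwa [h2]
        rw [pvSq_fix t.toList false hni (by simp)]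
        exact String.ofList_toList.symm
  exact H t.toList.length t (le_refl _)

theorem pvFlatMap_flatMap (φ ψ : Char → List Char) (l : List Char) :
    (l.flatMap φ).flatMap ψ = l.flatMap (fun c => (φ c).flatMap ψ) := by
  induction l with
  | nil => simp
  | cons c t ih => simp [ih]

-- A's '(' , ')' , '-' single-char replaces amount to one flatMap of pvPsi
theorem pvPsi_of_repG (l : List Char) :
    pvRepG ['-'] ['_'] (pvRepG [')'] [] (pvRepG ['('] ['_'] l)) = l.flatMap pvPsi := by
  rw [pvRepG_single, pvRepG_single, pvRepG_single, pvFlatMap_flatMap, pvFlatMap_flatMap]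
  congr 1
  funext c
  by_cases h1 : c = '(' <;> by_cases h2 : c = ')' <;> by_cases h3 : c = '-' <;>
    simp_all [pvPsi]

-- composing the dot removal with pvPsi gives pvPhi
theorem pvPhi_of (l : List Char) :
    (l.flatMap (fun c => if c = '.' then [] else [c])).flatMap pvPsi = l.flatMap pvPhi := by
  rw [pvFlatMap_flatMap]
  congr 1
  funext c
  by_cases h1 : c = '.' <;> by_cases h2 : c = ')' <;> by_cases h3 : c = '(' <;>
    by_cases h4 : c = '-' <;> by_cases h5 : c = '_' <;> simp_all [pvPsi, pvPhi]

-- ===== VERDICT (by name: the statement is the Claim_ definition above) =====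
theorem sanitize_ffmpeg_layout_token_spec : Claim_equal_sanitize_ffmpeg_layout_token := by
  intro s _
  unfold Spec_sanitize_ffmpeg_layout_token sanitize_ffmpeg_layout_token sanitize_ffmpeg_layout_token_alt
  dsimp only
  rw [pvFoldB]
  simp only [List.nil_append]
  rw [pvLoopA_eq]
  have edot : (("." : String)).toList = ['.'] := by decide
  have eemp : (("" : String)).toList = ([] : List Char) := by decide
  have eside : (("(side)" : String)).toList = ['(', 's', 'i', 'd', 'e', ')'] := by decide
  have euside : (("_side" : String)).toList = ['_', 's', 'i', 'd', 'e'] := by decide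
  have ewide : (("(wide)" : String)).toList = ['(', 'w', 'i', 'd', 'e', ')'] := by decide
  have euwide : (("_wide" : String)).toList = ['_', 'w', 'i', 'd', 'e'] := by decide
  have eop : (("(" : String)).toList = ['('] := by decide
  have ecp : ((")" : String)).toList = [')'] := by decide
  have eus : (("_" : String)).toList = ['_'] := by decide
  have edash : (("-" : String)).toList = ['-'] := by decide
  simp only [PySem.Str.toList_replace, edot, eemp, eside, euside, ewide, euwide, eop, ecp, eus, edash]
  rw [pvReplace_eq_repG _ _ _ (by decide), pvReplace_eq_repG _ _ _ (by decide),
    pvReplace_eq_repG _ _ _ (by decide), pvReplace_eq_repG _ _ _ (by decide),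
    pvReplace_eq_repG _ _ _ (by decide), pvReplace_eq_repG _ _ _ (by decide)]
  have hT : pvRepG ['-'] ['_'] (pvRepG [')'] [] (pvRepG ['('] ['_']
      (pvRepG ['(', 'w', 'i', 'd', 'e', ')'] ['_', 'w', 'i', 'd', 'e']
        (pvRepG ['(', 's', 'i', 'd', 'e', ')'] ['_', 's', 'i', 'd', 'e']
          (pvRepG ['.'] [] s.toList))))) = s.toList.flatMap pvPhi := by
    rw [pvPsi_of_repG,
      pvRepG_flatMap _ _ pvPsi (by decide) (by decide) _ _ (le_refl _),
      pvRepG_flatMap _ _ pvPsi (by decide) (by decide) _ _ (le_refl _),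
      pvRepG_single, pvPhi_of]
  rw [hT]
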